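-- pv_equiv track=rewrite | github.com/sun1279/pythontest | domain.py | IsGood3
-- ===== SOURCE A (Python) =====
-- def IsGood3(a):
--     cnt = 0
--     tmp = 99
--     for i in range(len(a)):
--         if tmp==int(a[i]):
--             cnt+=1
--         else:
--             if cnt is 2:
--                 cnt=1
--                 tmp = int(a[i])
--             elif cnt is 0:
--                 cnt=1
--                 tmp = int(a[i])
--             else:
--                 return False
--
--     return True
-- ===== SOURCE B (Python) =====
-- def IsGood3(a):
--     # Run-length encode the sequence (most recent run first), then check
--     # that every run except the last one has length exactly 2.
--     runs = []  # list of (value, length), most recent run at the front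
--     for x in a:
--         x = int(x)
--         if runs and runs[0][0] == x:
--             runs[0] = (x, runs[0][1] + 1)
--         else:
--             runs.insert(0, (x, 1))
--     return all(l == 2 for _, l in runs[1:])
-- ===== Notes on version B (the rewrite author's own statement) =====
-- stated objective: alternative
-- what changed: B run-length-encodes the list first and then checks that every run except the final one has length 2, instead of A's stateful single loop with counters and early return.
import Mathlib
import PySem

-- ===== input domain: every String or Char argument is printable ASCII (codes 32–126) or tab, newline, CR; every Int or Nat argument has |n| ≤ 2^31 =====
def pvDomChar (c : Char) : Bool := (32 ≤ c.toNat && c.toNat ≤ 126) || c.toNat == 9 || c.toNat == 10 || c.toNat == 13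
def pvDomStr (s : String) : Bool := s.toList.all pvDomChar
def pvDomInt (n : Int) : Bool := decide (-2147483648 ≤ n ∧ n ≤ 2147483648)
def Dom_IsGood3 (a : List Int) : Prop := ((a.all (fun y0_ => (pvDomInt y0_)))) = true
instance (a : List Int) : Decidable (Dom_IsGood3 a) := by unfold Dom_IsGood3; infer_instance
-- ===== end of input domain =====

-- B run-length-encodes the list and checks every run but the last has length 2; alternative decomposition, same cost.

-- ===== PORT A =====
-- A's for-loop over range(len(a)) with state (cnt, tmp) and early `return False`,
-- transliterated as structural recursion over the elements (a[i] for i in order).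
def IsGood3.loop : List Int → Int → Int → Bool
  | [], _, _ => true
  | x :: xs, cnt, tmp =>
    if tmp = x then IsGood3.loop xs (cnt + 1) tmp
    else if cnt = 2 then IsGood3.loop xs 1 x
    else if cnt = 0 then IsGood3.loop xs 1 x
    else false

def IsGood3 (a : List Int) : Bool := IsGood3.loop a 0 99

-- ===== PORT B =====
-- one step of B's run-length encoding: merge into the front run or start a new one
def stepB (runs : List (Int × Int)) (x : Int) : List (Int × Int) :=
  match runs with
  | (v, l) :: rest => if v = x then (v, l + 1) :: rest else (x, 1) :: (v, l) :: rest
  | [] => [(x, 1)]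

def IsGood3_alt (a : List Int) : Bool :=
  ((a.foldl stepB []).drop 1).all (fun p => p.2 == 2)

-- ===== PRECONDITION & SPEC =====
def Spec_IsGood3 (a : List Int) (out : Bool) : Prop := out = IsGood3_alt a
instance (a : List Int) (out : Bool) : Decidable (Spec_IsGood3 a out) := by unfold Spec_IsGood3; infer_instance

-- ===== CLAIM (what is proved, stated in full; the proofs are below) =====
def Claim_equal_IsGood3 : Prop := ∀ (a : List Int), Dom_IsGood3 a → Spec_IsGood3 a (IsGood3 a)

-- ===== LEMMAS AND PROOFS =====

-- the runs below the current front run are never touched by further folding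
lemma stepB_stack : ∀ (xs : List Int) (v l : Int) (rest : List (Int × Int)),
    ∃ hd mid, xs.foldl stepB ((v, l) :: rest) = hd :: (mid ++ rest) := by
  intro xs
  induction xs with
  | nil => exact fun v l rest => ⟨(v, l), [], rfl⟩
  | cons x xs ih =>
    intro v l rest
    by_cases h : v = x
    · simpa [List.foldl, stepB, h] using ih v (l + 1) rest
    · obtain ⟨hd, mid, hm⟩ := ih x 1 ((v, l) :: rest)
      exact ⟨hd, mid ++ [(v, l)], by simpa [List.foldl, stepB, h] using hm⟩

-- loop invariant: A's remaining loop equals B's check, given the already-closed runs all have length 2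
lemma key : ∀ (xs : List Int) (v l : Int) (rest : List (Int × Int)),
    1 ≤ l → rest.all (fun p => p.2 == 2) = true →
    IsGood3.loop xs l v = ((xs.foldl stepB ((v, l) :: rest)).drop 1).all (fun p => p.2 == 2) := by
  intro xs
  induction xs with
  | nil => intro v l rest _ hrest; simpa [IsGood3.loop] using hrest.symm
  | cons x xs ih =>
    intro v l rest hl hrest
    by_cases h : v = x
    · simpa [IsGood3.loop, stepB, h] using ih v (l + 1) rest (by omega) hrest
    · by_cases h2 : l = 2
      · have := ih x 1 ((v, l) :: rest) (by omega)
          (by simp [List.all_cons, hrest, h2])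
        simpa [IsGood3.loop, stepB, h, h2] using this
      · have h0 : l ≠ 0 := by omega
        obtain ⟨hd, mid, hm⟩ := stepB_stack xs x 1 ((v, l) :: rest)
        simp [IsGood3.loop, stepB, h, h2, h0, hm, List.all_append, List.all_cons]

-- ===== VERDICT (by name: the statement is the Claim_ definition above) =====
theorem IsGood3_spec : Claim_equal_IsGood3 := by
  intro a _
  unfold Spec_IsGood3 IsGood3 IsGood3_alt
  cases a with
  | nil => rfl
  | cons x xs =>
    by_cases h : (99 : Int) = x
    · simpa [IsGood3.loop, stepB, h] using key xs x 1 [] (by omega) rfl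
    · simpa [IsGood3.loop, stepB, h] using key xs x 1 [] (by omega) rfl
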